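-- pv_equiv track=rewrite | github.com/shelestdan/1c-order-matching | scripts/process_1c_orders.py | expand_dimension_values
-- ===== SOURCE A (Python) =====
-- INCH_TO_DN = {
--     "1/2": "15",
--     "3/4": "20",
--     "1": "25",
--     "11/4": "32",
--     "1-1/4": "32",
--     "11/2": "40",
--     "1-1/2": "40",
--     "2": "50",
--     "21/2": "65",
--     "2-1/2": "65",
--     "3": "80",
--     "4": "100",
-- }
--
-- def expand_dimension_values(grouped: dict[str, set[str]]) -> dict[str, set[str]]:
--     expanded = {key: set(values) for key, values in grouped.items()}
--     dn_values = expanded.setdefault("dn", set())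
--     inch_values = expanded.setdefault("inch", set())
--     for inch_value in list(inch_values):
--         mapped_dn = INCH_TO_DN.get(inch_value)
--         if mapped_dn:
--             dn_values.add(mapped_dn)
--     for dn_value in list(dn_values):
--         for inch_value, mapped_dn in INCH_TO_DN.items():
--             if mapped_dn == dn_value:
--                 inch_values.add(inch_value)
--     return expanded
-- ===== SOURCE B (Python) =====
-- INCH_TO_DN = {
--     "1/2": "15",
--     "3/4": "20",
--     "1": "25",
--     "11/4": "32",
--     "1-1/4": "32",
--     "11/2": "40",
--     "1-1/2": "40",
--     "2": "50",
--     "21/2": "65",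
--     "2-1/2": "65",
--     "3": "80",
--     "4": "100",
-- }
--
--
-- def expand_dimension_values(grouped: dict[str, set[str]]) -> dict[str, set[str]]:
--     expanded = {key: set(values) for key, values in grouped.items()}
--     if "dn" not in expanded:
--         expanded["dn"] = set()
--     if "inch" not in expanded:
--         expanded["inch"] = set()
--     dn_values = expanded["dn"]
--     inch_values = expanded["inch"]
--     # Single worklist closure over the inch<->dn relation: every pending value is
--     # a tagged node; popping an inch node adds its dn, popping a dn node adds all
--     # of its inch spellings, and every newly added value is enqueued in turn.
--     queue = [("dn", value) for value in dn_values]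
--     queue += [("inch", value) for value in inch_values]
--     while queue:
--         kind, value = queue.pop(0)
--         if kind == "inch":
--             mapped_dn = INCH_TO_DN.get(value)
--             if mapped_dn is not None and mapped_dn not in dn_values:
--                 dn_values.add(mapped_dn)
--                 queue.append(("dn", mapped_dn))
--         else:
--             for inch_value, mapped_dn in INCH_TO_DN.items():
--                 if mapped_dn == value and inch_value not in inch_values:
--                     inch_values.add(inch_value)
--                     queue.append(("inch", inch_value))
--     return expanded
-- ===== Notes on version B (the rewrite author's own statement) =====
-- stated objective: alternative
-- what changed: B computes the expansion as a single BFS-style worklist closure: one queue of ('dn'/'inch', value) nodes seeded with both sets, where popping an inch node adds its dn and popping a dn node adds its inch spellings, enqueueing every newly added value until the queue drains; A instead runs two fixed staged passes over the sets.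
import Mathlib
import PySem

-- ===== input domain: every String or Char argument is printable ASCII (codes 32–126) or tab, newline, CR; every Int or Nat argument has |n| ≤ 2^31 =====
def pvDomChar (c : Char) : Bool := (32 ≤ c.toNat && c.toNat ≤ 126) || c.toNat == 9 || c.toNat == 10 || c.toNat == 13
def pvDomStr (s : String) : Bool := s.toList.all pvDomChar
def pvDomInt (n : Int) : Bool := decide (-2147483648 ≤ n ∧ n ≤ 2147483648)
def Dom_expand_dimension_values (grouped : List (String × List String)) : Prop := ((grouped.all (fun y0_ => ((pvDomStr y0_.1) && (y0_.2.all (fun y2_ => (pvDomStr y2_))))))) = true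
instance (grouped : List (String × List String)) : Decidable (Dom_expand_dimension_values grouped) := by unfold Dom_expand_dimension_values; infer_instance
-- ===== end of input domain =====

-- B replaces A's two fixed staged passes by a single BFS-style worklist closure over the
-- inch↔dn relation (a queue of tagged pending values, each popped node expanding into the
-- other unit and enqueueing what it adds); objective: alternative (same cost, different algorithm).
-- (Dict values are Python sets; the ports model them in first-insertion order.)

-- ===== PORT A =====
def INCH_TO_DN : List (String × String) :=
  [("1/2", "15"), ("3/4", "20"), ("1", "25"), ("11/4", "32"), ("1-1/4", "32"),
   ("11/2", "40"), ("1-1/2", "40"), ("2", "50"), ("21/2", "65"), ("2-1/2", "65"),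
   ("3", "80"), ("4", "100")]

def expand_dimension_values (grouped : List (String × List String)) : List (String × List String) :=
  let expanded : PySem.Dict String (List String) :=
    ⟨grouped.map (fun kv => (kv.1, PySem.Set.ofList kv.2))⟩
  let expanded := expanded.setdefault "dn" []
  let expanded := expanded.setdefault "inch" []
  let dn_values : PySem.Set String := expanded.getD "dn" []
  let inch_values : PySem.Set String := expanded.getD "inch" []
  let dn_values := inch_values.foldl (fun acc iv =>
    match PySem.Dict.get? (⟨INCH_TO_DN⟩ : PySem.Dict String String) iv with
    | some mapped_dn => if mapped_dn ≠ "" then PySem.Set.add acc mapped_dn else acc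
    | none => acc) dn_values
  let inch_values := dn_values.foldl (fun acc dv =>
    INCH_TO_DN.foldl (fun acc2 p => if p.2 == dv then PySem.Set.add acc2 p.1 else acc2) acc)
    inch_values
  ((expanded.insert "dn" dn_values).insert "inch" inch_values).items

-- ===== PORT B =====
-- the worklist loop of Source B; fuel is a totality guard only (each iteration pops one item,
-- and at most 100 items can ever be appended beyond the initial queue on any input)
def pvBfs : Nat → List (String × String) → PySem.Set String → PySem.Set String →
    PySem.Set String × PySem.Set String
  | 0, _, dn, inch => (dn, inch)
  | _ + 1, [], dn, inch => (dn, inch)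
  | fuel + 1, (kind, value) :: rest, dn, inch =>
    if kind == "inch" then
      match PySem.Dict.get? (⟨INCH_TO_DN⟩ : PySem.Dict String String) value with
      | some mapped_dn =>
        if mapped_dn ∈ dn then pvBfs fuel rest dn inch
        else pvBfs fuel (rest ++ [("dn", mapped_dn)]) (dn ++ [mapped_dn]) inch
      | none => pvBfs fuel rest dn inch
    else
      let st := INCH_TO_DN.foldl
        (fun (st : PySem.Set String × List (String × String)) p =>
          if p.2 = value ∧ p.1 ∉ st.1 then (st.1 ++ [p.1], st.2 ++ [("inch", p.1)]) else st)
        (inch, [])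
      pvBfs fuel (rest ++ st.2) dn st.1

def expand_dimension_values_alt (grouped : List (String × List String)) : List (String × List String) :=
  let expanded : PySem.Dict String (List String) :=
    ⟨grouped.map (fun kv => (kv.1, PySem.Set.ofList kv.2))⟩
  let expanded := if expanded.contains "dn" then expanded else expanded.insert "dn" []
  let expanded := if expanded.contains "inch" then expanded else expanded.insert "inch" []
  let dn_values : PySem.Set String := expanded.getD "dn" []
  let inch_values : PySem.Set String := expanded.getD "inch" []
  let queue : List (String × String) :=
    dn_values.map (fun v => (("dn" : String), v)) ++ inch_values.map (fun v => (("inch" : String), v))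
  let res := pvBfs (queue.length + 100) queue dn_values inch_values
  ((expanded.insert "dn" res.1).insert "inch" res.2).items

-- ===== PRECONDITION & SPEC =====
def Spec_expand_dimension_values (grouped : List (String × List String)) (out : List (String × List String)) : Prop := out = expand_dimension_values_alt grouped
instance (grouped : List (String × List String)) (out : List (String × List String)) : Decidable (Spec_expand_dimension_values grouped out) := by unfold Spec_expand_dimension_values; infer_instance

-- ===== CLAIM (what is proved, stated in full; the proofs are below) =====
def Claim_equal_expand_dimension_values : Prop := ∀ (grouped : List (String × List String)), Dom_expand_dimension_values grouped → Spec_expand_dimension_values grouped (expand_dimension_values grouped)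

-- ===== LEMMAS AND PROOFS =====

-- A's setdefault is B's conditional insert
theorem pv_setdefault_eq (d : PySem.Dict String (List String)) (k : String) :
    d.setdefault k [] = if d.contains k then d else d.insert k [] := by
  by_cases h : d.contains k = true
  · rw [PySem.Dict.setdefault_of_contains d [] h, if_pos h]
  · rw [PySem.Dict.setdefault_of_not_contains d [] (by simpa using h), if_neg h]

-- table lookup, proof-side abbreviation
def pvGet (iv : String) : Option String :=
  PySem.Dict.get? (⟨INCH_TO_DN⟩ : PySem.Dict String String) iv

-- generic "conditionally add one element to a growing set, recording what was added"
def pvFoldAdd {α : Type} (f : PySem.Set String → α → Option String) (l : List α)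
    (st : PySem.Set String × List String) : PySem.Set String × List String :=
  l.foldl (fun st x =>
    match f st.1 x with
    | some v => (st.1 ++ [v], st.2 ++ [v])
    | none => st) st

def pvFInch (s : PySem.Set String) (iv : String) : Option String :=
  match pvGet iv with
  | some dv => if dv ∈ s then none else some dv
  | none => none

def pvFPair (s : PySem.Set String) (q : String × (String × String)) : Option String :=
  if q.2.2 = q.1 ∧ q.2.1 ∉ s then some q.2.1 else none

-- processing a batch of inch items: resulting dn set and the dn values newly added
def pvProcInch (I : List String) (dn : PySem.Set String) : PySem.Set String × List String :=
  pvFoldAdd pvFInch I (dn, [])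

-- processing a batch of dn items: resulting inch set and the inch values newly added
def pvProcDn (D : List String) (inch : PySem.Set String) : PySem.Set String × List String :=
  pvFoldAdd pvFPair (D.flatMap (fun dv => INCH_TO_DN.map (fun p => (dv, p)))) (inch, [])

theorem pv_bfs_nil (f : Nat) (dn inch : PySem.Set String) :
    pvBfs f [] dn inch = (dn, inch) := by
  cases f <;> rfl

theorem pv_foldAdd_cons {α : Type} (f : PySem.Set String → α → Option String) (x : α)
    (l : List α) (st : PySem.Set String × List String) :
    pvFoldAdd f (x :: l) st
      = pvFoldAdd f l
          (match f st.1 x with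
           | some v => (st.1 ++ [v], st.2 ++ [v])
           | none => st) := rfl

theorem pv_foldAdd_cons_none {α : Type} (f : PySem.Set String → α → Option String) (x : α)
    (l : List α) (s : PySem.Set String) (a : List String) (h : f s x = none) :
    pvFoldAdd f (x :: l) (s, a) = pvFoldAdd f l (s, a) := by
  rw [pv_foldAdd_cons]; simp [h]

theorem pv_foldAdd_cons_some {α : Type} (f : PySem.Set String → α → Option String) (x : α)
    (l : List α) (s : PySem.Set String) (a : List String) (v : String) (h : f s x = some v) :
    pvFoldAdd f (x :: l) (s, a) = pvFoldAdd f l (s ++ [v], a ++ [v]) := by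
  rw [pv_foldAdd_cons]; simp [h]

theorem pv_foldAdd_append {α : Type} (f : PySem.Set String → α → Option String)
    (l₁ l₂ : List α) (st : PySem.Set String × List String) :
    pvFoldAdd f (l₁ ++ l₂) st = pvFoldAdd f l₂ (pvFoldAdd f l₁ st) := by
  simp [pvFoldAdd, List.foldl_append]

theorem pv_foldAdd_acc {α : Type} (f : PySem.Set String → α → Option String) (l : List α)
    (s : PySem.Set String) (a : List String) :
    pvFoldAdd f l (s, a) = ((pvFoldAdd f l (s, [])).1, a ++ (pvFoldAdd f l (s, [])).2) := by
  induction l generalizing s a with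
  | nil => simp [pvFoldAdd]
  | cons x l ih =>
    cases h : f s x with
    | none => rw [pv_foldAdd_cons_none f x l s a h, pv_foldAdd_cons_none f x l s [] h, ih]
    | some v =>
      rw [pv_foldAdd_cons_some f x l s a v h, pv_foldAdd_cons_some f x l s [] v h,
          ih (s ++ [v]) (a ++ [v]), ih (s ++ [v]) ([] ++ [v])]
      simp

theorem pv_foldAdd_fst {α : Type} (f : PySem.Set String → α → Option String) (l : List α)
    (s : PySem.Set String) :
    (pvFoldAdd f l (s, [])).1
      = l.foldl (fun s x => match f s x with | some v => s ++ [v] | none => s) s := by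
  induction l generalizing s with
  | nil => rfl
  | cons x l ih =>
    simp only [List.foldl_cons]
    cases h : f s x with
    | none => rw [pv_foldAdd_cons_none f x l s [] h, ih]
    | some v => rw [pv_foldAdd_cons_some f x l s [] v h, pv_foldAdd_acc, ih]

theorem pv_foldAdd_inv {α : Type} (f : PySem.Set String → α → Option String)
    (hf : ∀ s x v, f s x = some v → v ∉ s) (l : List α) (s : PySem.Set String) :
    (pvFoldAdd f l (s, [])).1 = s ++ (pvFoldAdd f l (s, [])).2
      ∧ (pvFoldAdd f l (s, [])).2.Nodup
      ∧ ∀ v ∈ (pvFoldAdd f l (s, [])).2, v ∉ s := by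
  induction l generalizing s with
  | nil => simp [pvFoldAdd]
  | cons x l ih =>
    cases h : f s x with
    | none => rw [pv_foldAdd_cons_none f x l s [] h]; exact ih s
    | some v =>
      rw [pv_foldAdd_cons_some f x l s [] v h, pv_foldAdd_acc]
      simp only [List.nil_append, List.singleton_append]
      obtain ⟨h1, h2, h3⟩ := ih (s ++ [v])
      have hv : v ∉ s := hf s x v h
      refine ⟨by rw [h1]; simp, ?_, ?_⟩
      · exact List.nodup_cons.mpr ⟨fun hc => (h3 v hc) (by simp), h2⟩
      · intro u hu
        rcases List.mem_cons.mp hu with rfl | hu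
        · exact hv
        · exact fun hus => (h3 u hu) (by simp [hus])

theorem pv_foldAdd_mem {α : Type} (f : PySem.Set String → α → Option String) (l : List α)
    (s : PySem.Set String) (v : String) (hv : v ∈ (pvFoldAdd f l (s, [])).2) :
    ∃ x ∈ l, ∃ s', f s' x = some v := by
  induction l generalizing s with
  | nil => simp [pvFoldAdd] at hv
  | cons x l ih =>
    cases h : f s x with
    | none =>
      rw [pv_foldAdd_cons_none f x l s [] h] at hv
      obtain ⟨y, hy, hfy⟩ := ih s hv
      exact ⟨y, by simp [hy], hfy⟩
    | some w =>
      rw [pv_foldAdd_cons_some f x l s [] w h, pv_foldAdd_acc] at hv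
      simp only [List.nil_append, List.singleton_append] at hv
      rcases List.mem_cons.mp hv with rfl | hv'
      · exact ⟨x, by simp, s, h⟩
      · obtain ⟨y, hy, hfy⟩ := ih (s ++ [w]) hv'
        exact ⟨y, by simp [hy], hfy⟩

theorem pv_foldAdd_noop {α : Type} (f : PySem.Set String → α → Option String) (l : List α)
    (s : PySem.Set String) (a : List String) (h : ∀ x ∈ l, f s x = none) :
    pvFoldAdd f l (s, a) = (s, a) := by
  induction l with
  | nil => rfl
  | cons x l ih =>
    rw [pv_foldAdd_cons_none f x l s a (h x (by simp))]
    exact ih fun y hy => h y (by simp [hy])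

theorem pv_nodup_subset_length (l m : List String) (h : l.Nodup) (hs : l ⊆ m) :
    l.length ≤ m.length := by
  calc l.length = l.toFinset.card := (List.toFinset_card_of_nodup h).symm
    _ ≤ m.toFinset.card := Finset.card_le_card (fun x hx => by
        simp only [List.mem_toFinset] at *; exact hs hx)
    _ ≤ m.length := m.toFinset_card_le

-- every value of INCH_TO_DN is a nonempty string, and every table pair is what get? returns
theorem pv_get_mem (iv d : String) (h : pvGet iv = some d) : ∃ p ∈ INCH_TO_DN, p.1 = iv ∧ p.2 = d := by
  simp only [pvGet, PySem.Dict.get?, Option.map_eq_some_iff] at h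
  obtain ⟨p, hf, hd⟩ := h
  have hmem := List.mem_of_find?_eq_some hf
  have hkey := List.find?_some hf
  exact ⟨p, hmem, by simpa using hkey, hd⟩

theorem pv_get_ne_empty (iv d : String) (h : pvGet iv = some d) : d ≠ "" := by
  obtain ⟨p, hmem, -, hd⟩ := pv_get_mem iv d h
  subst hd
  fin_cases hmem <;> decide

theorem pv_get_of_mem : ∀ p ∈ INCH_TO_DN, pvGet p.1 = some p.2 := by decide

-- hf hypotheses of pv_foldAdd_inv for the two step functions
theorem pv_fInch_fresh : ∀ s x v, pvFInch s x = some v → v ∉ s := by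
  intro s x v h
  unfold pvFInch at h
  cases hg : pvGet x with
  | none => simp [hg] at h
  | some dv =>
    rw [hg] at h
    by_cases hm : dv ∈ s
    · simp [hm] at h
    · simp only [if_neg hm, Option.some.injEq] at h
      exact h ▸ hm

theorem pv_fPair_fresh : ∀ s q v, pvFPair s q = some v → v ∉ s := by
  intro s q v h
  unfold pvFPair at h
  by_cases hc : q.2.2 = q.1 ∧ q.2.1 ∉ s
  · rw [if_pos hc] at h; cases h; exact hc.2
  · simp [hc] at h

-- what a newly added value of each processor is
theorem pv_procInch_mem (I : List String) (dn : PySem.Set String) (v : String)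
    (hv : v ∈ (pvProcInch I dn).2) : ∃ iv ∈ I, pvGet iv = some v := by
  obtain ⟨iv, hiv, s', hf⟩ := pv_foldAdd_mem pvFInch I dn v hv
  refine ⟨iv, hiv, ?_⟩
  unfold pvFInch at hf
  cases hg : pvGet iv with
  | none => simp [hg] at hf
  | some dv =>
    simp only [hg] at hf
    by_cases hm : dv ∈ s'
    · simp [hm] at hf
    · simp only [if_neg hm] at hf
      · cases hf; rfl

theorem pv_procDn_mem (D : List String) (inch : PySem.Set String) (v : String)
    (hv : v ∈ (pvProcDn D inch).2) : ∃ p ∈ INCH_TO_DN, p.1 = v ∧ p.2 ∈ D := by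
  obtain ⟨q, hq, s', hf⟩ := pv_foldAdd_mem pvFPair _ inch v hv
  simp only [List.mem_flatMap, List.mem_map] at hq
  obtain ⟨dv, hdv, p, hp, rfl⟩ := hq
  unfold pvFPair at hf
  by_cases hc : (dv, p).2.2 = (dv, p).1 ∧ (dv, p).2.1 ∉ s'
  · rw [if_pos hc] at hf
    cases hf
    exact ⟨p, hp, rfl, by rw [show p.2 = dv from hc.1]; exact hdv⟩
  · simp [hc] at hf

-- the worklist never adds more than 12 values in one batch
theorem pv_procInch_len (I : List String) (dn : PySem.Set String) :
    (pvProcInch I dn).2.length ≤ 12 := by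
  have hinv := pv_foldAdd_inv pvFInch pv_fInch_fresh I dn
  have hsub : (pvProcInch I dn).2 ⊆ INCH_TO_DN.map Prod.snd := by
    intro v hv
    obtain ⟨iv, -, hg⟩ := pv_procInch_mem I dn v hv
    obtain ⟨p, hp, -, hd⟩ := pv_get_mem iv v hg
    exact List.mem_map.mpr ⟨p, hp, hd⟩
  simpa using pv_nodup_subset_length _ (INCH_TO_DN.map Prod.snd) hinv.2.1 hsub

theorem pv_procDn_len (D : List String) (inch : PySem.Set String) :
    (pvProcDn D inch).2.length ≤ 12 := by
  have hinv := pv_foldAdd_inv pvFPair pv_fPair_fresh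
    (D.flatMap (fun dv => INCH_TO_DN.map (fun p => (dv, p)))) inch
  have hsub : (pvProcDn D inch).2 ⊆ INCH_TO_DN.map Prod.fst := by
    intro v hv
    obtain ⟨p, hp, h1, -⟩ := pv_procDn_mem D inch v hv
    exact List.mem_map.mpr ⟨p, hp, h1⟩
  simpa using pv_nodup_subset_length _ (INCH_TO_DN.map Prod.fst) hinv.2.1 hsub

-- one pvBfs step, per kind of the head item
theorem pv_bfs_cons_inch (f : Nat) (v : String) (rest : List (String × String))
    (dn inch : PySem.Set String) :
    pvBfs (f + 1) (("inch", v) :: rest) dn inch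
      = match pvGet v with
        | some dv =>
          if dv ∈ dn then pvBfs f rest dn inch
          else pvBfs f (rest ++ [("dn", dv)]) (dn ++ [dv]) inch
        | none => pvBfs f rest dn inch := by
  simp [pvBfs, pvGet]

theorem pv_bfs_cons_dn (f : Nat) (v : String) (rest : List (String × String))
    (dn inch : PySem.Set String) :
    pvBfs (f + 1) (("dn", v) :: rest) dn inch
      = (let st := INCH_TO_DN.foldl
            (fun (st : PySem.Set String × List (String × String)) p =>
              if p.2 = v ∧ p.1 ∉ st.1 then (st.1 ++ [p.1], st.2 ++ [("inch", p.1)]) else st)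
            (inch, [])
         pvBfs f (rest ++ st.2) dn st.1) := by
  simp [pvBfs]

theorem pv_bfs_cons_inch_none (f : Nat) (v : String) (rest : List (String × String))
    (dn inch : PySem.Set String) (h : pvGet v = none) :
    pvBfs (f + 1) (("inch", v) :: rest) dn inch = pvBfs f rest dn inch := by
  rw [pv_bfs_cons_inch, h]

theorem pv_bfs_cons_inch_mem (f : Nat) (v dv : String) (rest : List (String × String))
    (dn inch : PySem.Set String) (h : pvGet v = some dv) (hm : dv ∈ dn) :
    pvBfs (f + 1) (("inch", v) :: rest) dn inch = pvBfs f rest dn inch := by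
  rw [pv_bfs_cons_inch, h]
  simp [hm]

theorem pv_bfs_cons_inch_new (f : Nat) (v dv : String) (rest : List (String × String))
    (dn inch : PySem.Set String) (h : pvGet v = some dv) (hm : dv ∉ dn) :
    pvBfs (f + 1) (("inch", v) :: rest) dn inch
      = pvBfs f (rest ++ [("dn", dv)]) (dn ++ [dv]) inch := by
  rw [pv_bfs_cons_inch, h]
  simp [hm]

-- the port's inner pair-fold is pvFoldAdd over the dv-tagged table
theorem pv_inner_eq (value : String) (l : List (String × String)) :
    ∀ (s : PySem.Set String) (q : List (String × String)),
    l.foldl (fun (st : PySem.Set String × List (String × String)) p =>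
        if p.2 = value ∧ p.1 ∉ st.1 then (st.1 ++ [p.1], st.2 ++ [("inch", p.1)]) else st) (s, q)
      = ((pvFoldAdd pvFPair (l.map (fun p => (value, p))) (s, [])).1,
         q ++ (pvFoldAdd pvFPair (l.map (fun p => (value, p))) (s, [])).2.map
               (fun v => (("inch" : String), v))) := by
  induction l with
  | nil => intro s q; simp [pvFoldAdd]
  | cons p l ih =>
    intro s q
    simp only [List.foldl_cons, List.map_cons]
    by_cases hc : p.2 = value ∧ p.1 ∉ s
    · rw [if_pos hc,
          pv_foldAdd_cons_some pvFPair (value, p) _ s [] p.1 (by simp [pvFPair, hc.1, hc.2]),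
          pv_foldAdd_acc, ih (s ++ [p.1]) (q ++ [("inch", p.1)])]
      simp
    · rw [if_neg hc,
          pv_foldAdd_cons_none pvFPair (value, p) _ s [] (by
            unfold pvFPair
            rw [if_neg]
            simpa using hc),
          ih s q]

-- B's inch-kind batch, consumed by the worklist loop
theorem pv_bfs_inch_batch (I : List String) :
    ∀ (f : Nat) (R : List (String × String)) (dn inch : PySem.Set String),
    pvBfs (I.length + f) (I.map (fun v => (("inch" : String), v)) ++ R) dn inch
      = pvBfs f (R ++ (pvProcInch I dn).2.map (fun v => (("dn" : String), v)))
          (pvProcInch I dn).1 inch := by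
  induction I with
  | nil => intro f R dn inch; simp [pvProcInch, pvFoldAdd]
  | cons v I ih =>
    intro f R dn inch
    have hlen : (v :: I).length + f = (I.length + f) + 1 := by simp; omega
    rw [hlen, List.map_cons, List.cons_append]
    cases hg : pvGet v with
    | none =>
      rw [pv_bfs_cons_inch_none _ v _ dn inch hg, ih f R dn inch]
      have : pvProcInch (v :: I) dn = pvProcInch I dn := by
        unfold pvProcInch
        exact pv_foldAdd_cons_none pvFInch v I dn [] (by simp [pvFInch, hg])
      rw [this]
    | some dv =>
      by_cases hm : dv ∈ dn
      · rw [pv_bfs_cons_inch_mem _ v dv _ dn inch hg hm, ih f R dn inch]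
        have : pvProcInch (v :: I) dn = pvProcInch I dn := by
          unfold pvProcInch
          exact pv_foldAdd_cons_none pvFInch v I dn [] (by simp [pvFInch, hg, hm])
        rw [this]
      · rw [pv_bfs_cons_inch_new _ v dv _ dn inch hg hm, List.append_assoc,
            ih f (R ++ [("dn", dv)]) (dn ++ [dv]) inch]
        have : pvProcInch (v :: I) dn
            = ((pvProcInch I (dn ++ [dv])).1, [dv] ++ (pvProcInch I (dn ++ [dv])).2) := by
          unfold pvProcInch
          rw [pv_foldAdd_cons_some pvFInch v I dn [] dv (by simp [pvFInch, hg, hm]),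
              pv_foldAdd_acc]
          simp
        rw [this]
        simp

-- B's dn-kind batch, consumed by the worklist loop
theorem pv_bfs_dn_batch (D : List String) :
    ∀ (f : Nat) (R : List (String × String)) (dn inch : PySem.Set String),
    pvBfs (D.length + f) (D.map (fun v => (("dn" : String), v)) ++ R) dn inch
      = pvBfs f (R ++ (pvProcDn D inch).2.map (fun v => (("inch" : String), v)))
          dn (pvProcDn D inch).1 := by
  induction D with
  | nil => intro f R dn inch; simp [pvProcDn, pvFoldAdd]
  | cons dv D ih =>
    intro f R dn inch
    have hlen : (dv :: D).length + f = (D.length + f) + 1 := by simp; omega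
    rw [hlen, List.map_cons, List.cons_append, pv_bfs_cons_dn]
    simp only [pv_inner_eq dv INCH_TO_DN inch []]
    rw [List.nil_append, List.append_assoc,
        ih f (R ++ (pvFoldAdd pvFPair (INCH_TO_DN.map (fun p => (dv, p))) (inch, [])).2.map
          (fun v => (("inch" : String), v))) dn _]
    have hsplit : pvProcDn (dv :: D) inch
        = ((pvProcDn D (pvFoldAdd pvFPair (INCH_TO_DN.map (fun p => (dv, p))) (inch, [])).1).1,
           (pvFoldAdd pvFPair (INCH_TO_DN.map (fun p => (dv, p))) (inch, [])).2
             ++ (pvProcDn D (pvFoldAdd pvFPair (INCH_TO_DN.map (fun p => (dv, p))) (inch, [])).1).2) := by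
      unfold pvProcDn
      rw [List.flatMap_cons, pv_foldAdd_append, pv_foldAdd_acc pvFPair _ inch [],
          List.nil_append, pv_foldAdd_acc pvFPair (D.flatMap _)]
    rw [hsplit]
    simp [List.append_assoc]

-- A's first pass is the dn side of pvProcInch
theorem pv_pass1_eq (inch0 dn0 : PySem.Set String) :
    inch0.foldl (fun acc iv =>
        match PySem.Dict.get? (⟨INCH_TO_DN⟩ : PySem.Dict String String) iv with
        | some mapped_dn => if mapped_dn ≠ "" then PySem.Set.add acc mapped_dn else acc
        | none => acc) dn0
      = (pvProcInch inch0 dn0).1 := by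
  rw [pvProcInch, pv_foldAdd_fst]
  congr 1
  funext s iv
  cases hg : pvGet iv with
  | none => simp only [pvFInch, pvGet] at *; rw [hg]
  | some dv =>
    have hne : dv ≠ "" := pv_get_ne_empty iv dv hg
    have hg' : PySem.Dict.get? (⟨INCH_TO_DN⟩ : PySem.Dict String String) iv = some dv := hg
    rw [hg']
    simp only [pvFInch, hg, if_pos hne, PySem.Set.add_eq_ite]
    by_cases hm : dv ∈ s
    · simp [hm]
    · simp [hm]

-- A's second pass over any dn list is the inch side of pvProcDn
theorem pv_pass2_eq (D : List String) (inch : PySem.Set String) :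
    D.foldl (fun acc dv =>
        INCH_TO_DN.foldl (fun acc2 p => if p.2 == dv then PySem.Set.add acc2 p.1 else acc2) acc)
      inch
      = (pvProcDn D inch).1 := by
  rw [pvProcDn, pv_foldAdd_fst]
  have hflat : ∀ (D : List String) (inch : PySem.Set String),
      (D.flatMap (fun dv => INCH_TO_DN.map (fun p => (dv, p)))).foldl
          (fun s q => match pvFPair s q with | some v => s ++ [v] | none => s) inch
        = D.foldl (fun acc dv =>
            INCH_TO_DN.foldl (fun acc2 p => if p.2 == dv then PySem.Set.add acc2 p.1 else acc2) acc)
          inch := by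
    intro D
    induction D with
    | nil => intro inch; rfl
    | cons dv D ih =>
      intro inch
      rw [List.flatMap_cons, List.foldl_append, List.foldl_cons, List.foldl_map, ih]
      congr 2
      funext acc2 p
      simp only [pvFPair]
      by_cases he : p.2 = dv
      · simp only [he, beq_self_eq_true, if_pos, PySem.Set.add_eq_ite]
        by_cases hm : p.1 ∈ acc2
        · simp [hm]
        · simp [hm]
      · simp [he, beq_eq_false_iff_ne.mpr he]
  exact (hflat D inch).symm

theorem pv_procInch_split (I : List String) (dn : PySem.Set String) :
    (pvProcInch I dn).1 = dn ++ (pvProcInch I dn).2 :=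
  (pv_foldAdd_inv pvFInch pv_fInch_fresh I dn).1

theorem pv_procDn_comp (D1 D2 : List String) (inch : PySem.Set String) :
    (pvProcDn (D1 ++ D2) inch).1 = (pvProcDn D2 (pvProcDn D1 inch).1).1 := by
  unfold pvProcDn
  rw [List.flatMap_append, pv_foldAdd_append, pv_foldAdd_acc pvFPair _ inch [],
      pv_foldAdd_acc pvFPair (D2.flatMap _)]

-- inch items whose dn is already present are no-ops for the worklist
theorem pv_procInch_noop (I : List String) (dn : PySem.Set String)
    (h : ∀ iv ∈ I, ∀ dv, pvGet iv = some dv → dv ∈ dn) :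
    pvProcInch I dn = (dn, []) := by
  unfold pvProcInch
  apply pv_foldAdd_noop
  intro iv hiv
  unfold pvFInch
  cases hg : pvGet iv with
  | none => rfl
  | some dv => simp [h iv hiv dv hg]

-- the worklist run equals A's two staged passes
theorem pv_main (dn0 inch0 : PySem.Set String) :
    pvBfs (dn0.length + inch0.length + 100)
        (dn0.map (fun v => (("dn" : String), v)) ++ inch0.map (fun v => (("inch" : String), v)))
        dn0 inch0
      = (inch0.foldl (fun acc iv =>
            match PySem.Dict.get? (⟨INCH_TO_DN⟩ : PySem.Dict String String) iv with
            | some mapped_dn => if mapped_dn ≠ "" then PySem.Set.add acc mapped_dn else acc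
            | none => acc) dn0,
          (inch0.foldl (fun acc iv =>
            match PySem.Dict.get? (⟨INCH_TO_DN⟩ : PySem.Dict String String) iv with
            | some mapped_dn => if mapped_dn ≠ "" then PySem.Set.add acc mapped_dn else acc
            | none => acc) dn0).foldl (fun acc dv =>
              INCH_TO_DN.foldl (fun acc2 p => if p.2 == dv then PySem.Set.add acc2 p.1 else acc2) acc)
            inch0) := by
  -- names for the intermediate states
  set S1 := (pvProcDn dn0 inch0).2 with hS1
  set inchA := (pvProcDn dn0 inch0).1 with hinchA
  set D2 := (pvProcInch inch0 dn0).2 with hD2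
  set dnB := (pvProcInch inch0 dn0).1 with hdnB
  set S4 := (pvProcDn D2 inchA).2 with hS4
  set inchC := (pvProcDn D2 inchA).1 with hinchC
  have hdnB_split : dnB = dn0 ++ D2 := pv_procInch_split inch0 dn0
  have hS1len : S1.length ≤ 12 := pv_procDn_len dn0 inch0
  have hD2len : D2.length ≤ 12 := pv_procInch_len inch0 dn0
  have hS4len : S4.length ≤ 12 := pv_procDn_len D2 inchA
  -- closure: every pending inch item maps into dnB
  have hnoop1 : pvProcInch S1 dnB = (dnB, []) := by
    apply pv_procInch_noop
    intro iv hiv dv hg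
    obtain ⟨p, hp, hp1, hp2⟩ := pv_procDn_mem dn0 inch0 iv (hS1 ▸ hiv)
    have := pv_get_of_mem p hp
    rw [hp1, hg] at this
    cases this
    rw [hdnB_split]
    exact List.mem_append_left _ hp2
  have hnoop2 : pvProcInch S4 dnB = (dnB, []) := by
    apply pv_procInch_noop
    intro iv hiv dv hg
    obtain ⟨p, hp, hp1, hp2⟩ := pv_procDn_mem D2 inchA iv (hS4 ▸ hiv)
    have := pv_get_of_mem p hp
    rw [hp1, hg] at this
    cases this
    rw [hdnB_split]
    exact List.mem_append_right _ hp2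
  -- run the five phases
  rw [Nat.add_assoc]
  rw [pv_bfs_dn_batch dn0 (inch0.length + 100) _ dn0 inch0, ← hS1, ← hinchA]
  rw [pv_bfs_inch_batch inch0 100 _ dn0 inchA, ← hD2, ← hdnB]
  rw [show (100 : Nat) = S1.length + (100 - S1.length) by omega]
  rw [pv_bfs_inch_batch S1 (100 - S1.length) _ dnB inchA, hnoop1]
  simp only [List.map_nil, List.append_nil]
  rw [show (100 - S1.length : Nat) = D2.length + (100 - S1.length - D2.length) by omega]
  rw [← List.append_nil (D2.map (fun v => (("dn" : String), v)))]
  rw [pv_bfs_dn_batch D2 (100 - S1.length - D2.length) [] dnB inchA, ← hS4, ← hinchC]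
  rw [List.nil_append]
  rw [show (100 - S1.length - D2.length : Nat) = S4.length + (100 - S1.length - D2.length - S4.length) by omega]
  rw [← List.append_nil (S4.map (fun v => (("inch" : String), v)))]
  rw [pv_bfs_inch_batch S4 _ [] dnB inchC, hnoop2]
  simp only [List.map_nil, List.append_nil]
  rw [pv_bfs_nil]
  -- identify with A's passes
  rw [pv_pass1_eq inch0 dn0, ← hdnB]
  rw [pv_pass2_eq dnB inch0]
  rw [show (pvProcDn dnB inch0).1 = inchC by
        rw [hdnB_split, pv_procDn_comp dn0 D2 inch0, ← hinchA, hinchC]]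

-- ===== VERDICT (by name: the statement is the Claim_ definition above) =====
theorem expand_dimension_values_spec : Claim_equal_expand_dimension_values := by
  intro grouped _
  unfold Spec_expand_dimension_values expand_dimension_values expand_dimension_values_alt
  simp only [pv_setdefault_eq, List.length_append, List.length_map]
  rw [pv_main]
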